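-- pv_equiv track=rewrite | github.com/dMedinaO/hydrophobinsIdentification | scripts/searchCandidateSequence.py | searchSequenceWithTwoCisteins
-- ===== SOURCE A (Python) =====
-- def searchSequenceWithTwoCisteins(sequence):
--
--     cont=0
--     for i in range(len(sequence)-1):
--         if sequence[i] == 'C' and sequence[i+1] == 'C':
--             cont+=1
--
--     if cont>=2:
--         return 0#posee doble enlace de cisteinas
--     else:
--         return 1#no posee doble enlace de cisteinas
-- ===== SOURCE B (Python) =====
-- def searchSequenceWithTwoCisteins(sequence):
--     # Blank out everything that is not 'C', split into maximal C-runs,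
--     # and use that a run of length k contains k-1 overlapping 'CC' pairs.
--     masked = ''.join(c if c == 'C' else ' ' for c in sequence)
--     runs = masked.split()
--     pairs = sum(len(run) - 1 for run in runs)
--     return 0 if pairs >= 2 else 1
-- ===== Notes on version B (the rewrite author's own statement) =====
-- stated objective: alternative
-- what changed: Instead of A's index loop testing sequence[i]/sequence[i+1] for every adjacent position, B masks non-'C' characters to spaces, splits the masked string into maximal C-runs with str.split(), and sums len(run)-1 over the runs (a run of length k holds k-1 overlapping pairs).
import Mathlib
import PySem

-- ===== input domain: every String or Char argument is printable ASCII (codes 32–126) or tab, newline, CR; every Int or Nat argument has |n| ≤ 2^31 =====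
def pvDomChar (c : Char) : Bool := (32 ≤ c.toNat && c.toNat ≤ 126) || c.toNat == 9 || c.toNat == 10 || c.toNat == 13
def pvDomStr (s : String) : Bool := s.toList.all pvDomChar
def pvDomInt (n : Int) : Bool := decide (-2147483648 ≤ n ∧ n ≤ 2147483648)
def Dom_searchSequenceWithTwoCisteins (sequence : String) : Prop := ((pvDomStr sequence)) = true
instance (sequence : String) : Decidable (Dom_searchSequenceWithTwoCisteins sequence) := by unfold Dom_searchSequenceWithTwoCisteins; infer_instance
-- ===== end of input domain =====

-- B replaces A's adjacent-index loop by masking non-'C' characters to spaces, splitting into maximal C-runs, and summing len(run)-1 (alternative decomposition, same cost).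


-- ===== PORT A =====
def searchSequenceWithTwoCisteins (sequence : String) : Int :=
  let cs := sequence.toList
  let cont : Int :=
    (PySem.List.pyRange 0 ((cs.length : Int) - 1) 1).foldl
      (fun cont i =>
        if PySem.List.pyGet? cs i = some 'C' ∧ PySem.List.pyGet? cs (i + 1) = some 'C'
        then cont + 1 else cont) 0
  if cont ≥ 2 then 0 else 1

-- ===== PORT B =====
def searchSequenceWithTwoCisteins_alt (sequence : String) : Int :=
  let masked := PySem.Str.join "" (sequence.toList.map (fun c => String.ofList [if c == 'C' then c else ' ']))
  let runs := PySem.Str.split₀ masked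
  let pairs : Int := (runs.map (fun r => (PySem.Str.len r : Int) - 1)).sum
  if pairs ≥ 2 then 0 else 1

-- ===== PRECONDITION & SPEC =====
def Spec_searchSequenceWithTwoCisteins (sequence : String) (out : Int) : Prop := out = searchSequenceWithTwoCisteins_alt sequence
instance (sequence : String) (out : Int) : Decidable (Spec_searchSequenceWithTwoCisteins sequence out) := by unfold Spec_searchSequenceWithTwoCisteins; infer_instance

-- ===== CLAIM (what is proved, stated in full; the proofs are below) =====
def Claim_equal_searchSequenceWithTwoCisteins : Prop := ∀ (sequence : String), Dom_searchSequenceWithTwoCisteins sequence → Spec_searchSequenceWithTwoCisteins sequence (searchSequenceWithTwoCisteins sequence)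

-- ===== LEMMAS AND PROOFS =====

-- the common value: number of overlapping 'CC' pairs in a character list
def pairCount : List Char → Int
  | a :: b :: t => (if a = 'C' ∧ b = 'C' then 1 else 0) + pairCount (b :: t)
  | _ => 0

-- adjacent non-space pairs, with a flag 'previous char was non-space'
def pairB : List Char → Bool → Int
  | [], _ => 0
  | c :: t, prev => (if PySem.Chars.isspace c = false ∧ prev = true then 1 else 0) + pairB t (!PySem.Chars.isspace c)

-- adjacent 'C' pairs, with a flag 'previous char was C'
def pairF : List Char → Bool → Int
  | [], _ => 0
  | c :: t, prev => (if (c == 'C') = true ∧ prev = true then 1 else 0) + pairF t (c == 'C')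

theorem go_sum (ms : List Char) : ∀ (cur : List Char) (acc : List (List Char)),
    ((PySem.Chars.split₀.go ms cur acc).map (fun r => (r.length : Int) - 1)).sum
      = ((acc.map (fun r => (r.length : Int) - 1)).sum)
        + (if cur.isEmpty then 0 else (cur.length : Int) - 1)
        + pairB ms (!cur.isEmpty) := by
  induction ms with
  | nil =>
    intro cur acc
    simp only [PySem.Chars.split₀.go, pairB]
    cases cur with
    | nil => simp
    | cons x xs => simp
  | cons c rest ih =>
    intro cur acc
    simp only [PySem.Chars.split₀.go]
    by_cases hs : PySem.Chars.isspace c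
    · simp only [hs, if_true]
      cases cur with
      | nil =>
        simp only [List.isEmpty_nil, if_true]
        rw [ih [] acc]
        simp [pairB, hs]
      | cons x xs =>
        simp only [List.isEmpty_cons, Bool.false_eq_true, if_false]
        rw [ih [] (((x :: xs)).reverse :: acc)]
        simp [pairB, hs]
        ring
    · simp only [Bool.not_eq_true] at hs
      simp only [hs, Bool.false_eq_true, if_false]
      rw [ih (c :: cur) acc]
      cases cur with
      | nil => simp [pairB, hs]
      | cons x xs =>
        simp [pairB, hs]
        omega

theorem pairB_mask (cs : List Char) : ∀ (b : Bool),
    pairB (cs.map (fun c => if c == 'C' then c else ' ')) b = pairF cs b := by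
  induction cs with
  | nil => intro b; simp [pairB, pairF]
  | cons c t ih =>
    intro b
    simp only [List.map_cons, pairB, pairF]
    by_cases h : c = 'C'
    · have h1 : (c == 'C') = true := by simp [h]
      rw [h1]
      simp only [if_true, h]
      have h2 : PySem.Chars.isspace 'C' = false := by decide
      rw [h2, ih]
      simp
    · have h1 : (c == 'C') = false := by simp [h]
      rw [h1]
      simp only [Bool.false_eq_true, if_false]
      have h2 : PySem.Chars.isspace ' ' = true := by decide
      rw [h2, ih]
      simp

theorem pairF_cons (t : List Char) : ∀ (c : Char), pairF t (c == 'C') = pairCount (c :: t) := by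
  induction t with
  | nil => intro c; simp [pairF, pairCount]
  | cons d t' ih =>
    intro c
    simp only [pairF, pairCount]
    rw [ih d]
    by_cases hc : c = 'C' <;> by_cases hd : d = 'C' <;> simp [hc, hd]

theorem pairF_false (cs : List Char) : pairF cs false = pairCount cs := by
  cases cs with
  | nil => simp [pairF, pairCount]
  | cons c t =>
    simp only [pairF]
    rw [pairF_cons t c]
    simp

-- A's loop equals pairCount
theorem foldA_eq (cs : List Char) (c0 : Int) :
    (PySem.List.pyRange 0 ((cs.length : Int) - 1) 1).foldl
      (fun cont i =>
        if PySem.List.pyGet? cs i = some 'C' ∧ PySem.List.pyGet? cs (i + 1) = some 'C'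
        then cont + 1 else cont) c0 = c0 + pairCount cs := by
  induction cs generalizing c0 with
  | nil => simp [PySem.List.pyRange_one_eq_nil, pairCount]
  | cons a t ih =>
    cases t with
    | nil =>
      simp [PySem.List.pyRange_one_eq_nil, pairCount]
    | cons b t' =>
      have hlen : ((a :: b :: t').length : Int) - 1 = ((b :: t').length : Int) := by
        simp
      rw [hlen]
      have hpos : (0 : Int) < ((b :: t').length : Int) := by
        have : 0 < (b :: t').length := by simp
        exact_mod_cast this
      rw [PySem.List.pyRange_one_cons hpos]
      simp only [List.foldl_cons, zero_add]
      have hshift :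
          ∀ (rest : List Char) (c1 : Int),
            (PySem.List.pyRange 1 ((rest.length : Int)) 1).foldl
              (fun cont i =>
                if PySem.List.pyGet? (a :: rest) i = some 'C' ∧ PySem.List.pyGet? (a :: rest) (i + 1) = some 'C'
                then cont + 1 else cont) c1
            = (PySem.List.pyRange 0 ((rest.length : Int) - 1) 1).foldl
              (fun cont i =>
                if PySem.List.pyGet? rest i = some 'C' ∧ PySem.List.pyGet? rest (i + 1) = some 'C'
                then cont + 1 else cont) c1 := by
        intro rest c1
        have h1 : PySem.List.pyRange 1 ((rest.length : Int)) 1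
            = (PySem.List.pyRange 0 ((rest.length : Int) - 1) 1).map (fun k => k + 1) := by
          rw [PySem.List.pyRange_one, PySem.List.pyRange_one]
          simp [List.map_map]
          intro k hk
          omega
        rw [h1, List.foldl_map]
        apply PySem.List.foldl_congr_mem
        intro acc i hi
        have hi0 : 0 ≤ i := by
          have := (PySem.List.mem_pyRange_one).1 hi; omega
        have e1 : PySem.List.pyGet? (a :: rest) (i + 1) = PySem.List.pyGet? rest i := by
          obtain ⟨n, rfl⟩ : ∃ n : Nat, i = (n : Int) := ⟨i.toNat, (Int.toNat_of_nonneg hi0).symm⟩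
          exact PySem.List.pyGet?_cons_succ _ _ _
        have e2 : PySem.List.pyGet? (a :: rest) (i + 1 + 1) = PySem.List.pyGet? rest (i + 1) := by
          obtain ⟨n, hn⟩ : ∃ n : Nat, i + 1 = (n : Int) := ⟨(i + 1).toNat, by omega⟩
          rw [hn]
          exact PySem.List.pyGet?_cons_succ _ _ _
        rw [e1, e2]
      rw [hshift (b :: t')]
      rw [ih]
      have hget0 : PySem.List.pyGet? (a :: b :: t') (0 : Int) = some a :=
        PySem.List.pyGet?_zero_cons _ _
      have hget1 : PySem.List.pyGet? (a :: b :: t') (1 : Int) = some b := by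
        rw [show ((1 : Int)) = ((1 : Nat) : Int) from rfl, PySem.List.pyGet?_natCast]
        rfl
      rw [hget0, hget1]
      simp only [pairCount]
      by_cases h : a = 'C' ∧ b = 'C'
      · have h' : (some a = some 'C' ∧ some b = some 'C') := ⟨by rw [h.1], by rw [h.2]⟩
        rw [if_pos h', if_pos h]
        ring
      · have h' : ¬ (some a = some 'C' ∧ some b = some 'C') := by
          simpa using h
        rw [if_neg h', if_neg h]
        ring

-- B's sum over the split words equals pairCount
theorem altSum_eq (cs : List Char) :
    ((PySem.Str.split₀ (PySem.Str.join "" (cs.map (fun c => String.ofList [if c == 'C' then c else ' '])))).map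
        (fun r => (PySem.Str.len r : Int) - 1)).sum = pairCount cs := by
  set masked := PySem.Str.join "" (cs.map (fun c => String.ofList [if c == 'C' then c else ' '])) with hm
  have htl : masked.toList = cs.map (fun c => if c == 'C' then c else ' ') := by
    rw [hm, PySem.Str.toList_join]
    have h1 : (List.map (fun c => String.ofList [if c == 'C' then c else ' ']) cs).map String.toList
        = (cs.map (fun c => if c == 'C' then c else ' ')).map (fun c => [c]) := by
      simp only [List.map_map]
      apply List.map_congr_left
      intro c _
      simp [String.toList_ofList]
    have h2 : ("" : String).toList = [] := rfl
    rw [h1, h2]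
    exact PySem.Chars.join_nil_singletons _
  calc ((PySem.Str.split₀ masked).map (fun r => (PySem.Str.len r : Int) - 1)).sum
      = (((PySem.Str.split₀ masked).map String.toList).map (fun l => (l.length : Int) - 1)).sum := by
        rw [List.map_map]
        apply congrArg
        apply List.map_congr_left
        intro r _
        simp [PySem.Str.len_eq]
    _ = ((PySem.Chars.split₀ masked.toList).map (fun l => (l.length : Int) - 1)).sum := by
        rw [PySem.Str.split₀_map_toList]
    _ = pairB masked.toList false := by
        have := go_sum masked.toList [] []
        simpa [PySem.Chars.split₀] using this
    _ = pairCount cs := by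
        rw [htl, pairB_mask, pairF_false]

-- ===== VERDICT (by name: the statement is the Claim_ definition above) =====
theorem searchSequenceWithTwoCisteins_spec : Claim_equal_searchSequenceWithTwoCisteins := by
  intro sequence _
  unfold Spec_searchSequenceWithTwoCisteins searchSequenceWithTwoCisteins searchSequenceWithTwoCisteins_alt
  simp only [ge_iff_le]
  rw [foldA_eq, altSum_eq]
  simp
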